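-- pv_equiv track=rewrite | github.com/Kwpolska/adventofcode | 2018/task02a.py | solve
-- ===== SOURCE A (Python) =====
-- import collections
--
-- def solve(data):
--     twos = threes = 0
--     for line in data.split('\n'):
--         c = collections.Counter(line)
--         if 2 in c.values():
--             twos += 1
--         if 3 in c.values():
--             threes += 1
--     return twos * threes
-- ===== SOURCE B (Python) =====
-- def solve(data):
--     # sort each line and scan run lengths instead of building a Counter
--     twos = threes = 0
--     for line in data.split('\n'):
--         s = sorted(line)
--         lengths = []
--         while s:
--             n = 0
--             while n < len(s) and s[n] == s[0]:
--                 n += 1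
--             lengths.append(n)
--             s = s[n:]
--         if 2 in lengths:
--             twos += 1
--         if 3 in lengths:
--             threes += 1
--     return twos * threes
-- ===== Notes on version B (the rewrite author's own statement) =====
-- stated objective: alternative
-- what changed: Per line, B sorts the characters and scans run lengths of equal adjacent characters instead of building a Counter hash map and testing its values.
import Mathlib
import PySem

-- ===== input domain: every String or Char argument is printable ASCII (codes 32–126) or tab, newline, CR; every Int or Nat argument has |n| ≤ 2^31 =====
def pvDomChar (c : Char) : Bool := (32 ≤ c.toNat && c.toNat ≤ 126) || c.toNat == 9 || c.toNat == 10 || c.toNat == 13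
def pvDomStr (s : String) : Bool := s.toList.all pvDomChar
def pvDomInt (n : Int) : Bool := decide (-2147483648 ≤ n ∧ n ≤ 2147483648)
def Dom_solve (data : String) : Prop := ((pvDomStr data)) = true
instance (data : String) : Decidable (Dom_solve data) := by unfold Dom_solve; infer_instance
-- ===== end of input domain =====

-- B replaces A's per-line Counter hash table with a sort-then-scan of run lengths (objective: alternative, same result).

-- ===== PORT A =====
-- loop body of A: build Counter(line), test 2 and 3 against its values
def stepA (tt : Int × Int) (line : List Char) : Int × Int :=
  let c := PySem.Dict.counter line
  let tt := if c.values.contains (2 : Int) then (tt.1 + 1, tt.2) else tt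
  if c.values.contains (3 : Int) then (tt.1, tt.2 + 1) else tt

def solve (data : String) : Int :=
  let p := (PySem.Chars.splitOn data.toList ['\n']).foldl stepA (0, 0)
  p.1 * p.2

-- ===== PORT B =====
-- run lengths of a list: length of the maximal prefix equal to the head, then recurse on the rest
def pvRuns (s : List Char) : List Nat :=
  match s with
  | [] => []
  | c :: rest =>
    (List.takeWhile (· == c) (c :: rest)).length :: pvRuns (List.dropWhile (· == c) (c :: rest))
termination_by s.length
decreasing_by
  simp only [List.dropWhile_cons, beq_self_eq_true, if_true, List.length_cons]
  exact Nat.lt_succ_of_le (List.dropWhile_sublist _ |>.length_le)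

-- loop body of B: sort the line, scan run lengths, test 2 and 3 against them
def stepB (tt : Int × Int) (line : List Char) : Int × Int :=
  let lengths := pvRuns (PySem.List.sorted line (fun x => x))
  let tt := if lengths.contains 2 then (tt.1 + 1, tt.2) else tt
  if lengths.contains 3 then (tt.1, tt.2 + 1) else tt

def solve_alt (data : String) : Int :=
  let p := (PySem.Chars.splitOn data.toList ['\n']).foldl stepB (0, 0)
  p.1 * p.2

-- ===== PRECONDITION & SPEC =====
def Spec_solve (data : String) (out : Int) : Prop := out = solve_alt data
instance (data : String) (out : Int) : Decidable (Spec_solve data out) := by unfold Spec_solve; infer_instance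

-- ===== CLAIM (what is proved, stated in full; the proofs are below) =====
def Claim_equal_solve : Prop := ∀ (data : String), Dom_solve data → Spec_solve data (solve data)

-- ===== LEMMAS AND PROOFS =====

-- n occurs among Counter(l).values() iff some character of l has count n
lemma mem_values_counter (l : List Char) (n : Int) :
    n ∈ (PySem.Dict.counter l).values ↔ ∃ c, c ∈ l ∧ (l.count c : Int) = n := by
  rw [PySem.Dict.values_eq_map_keys _ (PySem.Dict.nodup_keys_counter l) 0,
    PySem.Dict.keys_counter]
  simp only [List.mem_map, PySem.Dict.getD_counter, PySem.Set.mem_ofList]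

-- after dropping the leading run of c from a sorted list whose elements are all ≥ c, no c remains
lemma dropWhile_ne (l : List Char) (c : Char) (hl : l.Pairwise (· ≤ ·))
    (hc : ∀ x ∈ l, c ≤ x) : ∀ x ∈ List.dropWhile (· == c) l, x ≠ c := by
  induction l with
  | nil => intro x hx; simp at hx
  | cons a t ih =>
    rw [List.pairwise_cons] at hl
    intro x hx
    by_cases hac : a = c
    · have hbeq : (a == c) = true := by simp [hac]
      simp only [List.dropWhile_cons, hbeq, if_true] at hx
      exact ih hl.2 (fun y hy => hc y (List.mem_cons_of_mem a hy)) x hx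
    · have hbeq : (a == c) = false := by simp [hac]
      simp only [List.dropWhile_cons, hbeq, Bool.false_eq_true, if_false] at hx
      rcases List.mem_cons.mp hx with h | h
      · subst h; exact hac
      · intro hxc; subst hxc
        exact hac (le_antisymm (hl.1 _ h) (hc a (List.mem_cons_self)))

lemma pvRuns_nil : pvRuns [] = [] := by rw [pvRuns.eq_def]

lemma pvRuns_cons (c : Char) (rest : List Char) :
    pvRuns (c :: rest)
      = (List.takeWhile (· == c) (c :: rest)).length
        :: pvRuns (List.dropWhile (· == c) (c :: rest)) := by
  rw [pvRuns.eq_def]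

-- run lengths of a sorted list are exactly the multiplicities of its elements
lemma runs_mem : ∀ (N : Nat) (l : List Char), l.length ≤ N → l.Pairwise (· ≤ ·) →
    ∀ n : Nat, (n ∈ pvRuns l ↔ ∃ c, c ∈ l ∧ l.count c = n) := by
  intro N
  induction N with
  | zero =>
    intro l hlen _ n
    have : l = [] := List.length_eq_zero_iff.mp (Nat.le_zero.mp hlen)
    subst this; simp [pvRuns_nil]
  | succ N ih =>
    intro l hlen hl n
    match l with
    | [] => simp [pvRuns_nil]
    | c :: rest =>
      rw [List.pairwise_cons] at hl
      have hc : ∀ x ∈ rest, c ≤ x := hl.1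
      set t := List.takeWhile (· == c) rest with ht
      set d := List.dropWhile (· == c) rest with hd
      have htd : t ++ d = rest := List.takeWhile_append_dropWhile
      have htc : ∀ x ∈ t, x = c := by
        intro x hx
        have := List.mem_takeWhile_imp hx
        exact beq_iff_eq.mp this
      have hdne : ∀ x ∈ d, x ≠ c := dropWhile_ne rest c hl.2 hc
      have hdsub : d.Sublist rest := List.dropWhile_sublist _
      have hdpair : d.Pairwise (· ≤ ·) := List.Pairwise.sublist hdsub hl.2
      have hdlen : d.length ≤ N := by
        have := hdsub.length_le
        simp only [List.length_cons] at hlen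
        omega
      have hruns : pvRuns (c :: rest) = (1 + t.length) :: pvRuns d := by
        rw [pvRuns_cons]
        simp only [List.takeWhile_cons, List.dropWhile_cons, beq_self_eq_true, if_true,
          List.length_cons, ← ht, ← hd]
        rw [Nat.add_comm]
      have hcountc : (c :: rest).count c = 1 + t.length := by
        rw [List.count_cons_self, ← htd, List.count_append]
        have h1 : t.count c = t.length := List.count_eq_length.mpr (fun b hb => (htc b hb).symm)
        have h2 : d.count c = 0 := List.count_eq_zero.mpr (fun h => hdne c h rfl)
        omega
      have hcountd : ∀ c' ∈ d, (c :: rest).count c' = d.count c' := by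
        intro c' hc'
        have hne : c' ≠ c := hdne c' hc'
        have h1 : t.count c' = 0 := List.count_eq_zero.mpr (fun h => hne (htc c' h))
        rw [← htd]
        simp [List.count_cons, List.count_append, h1]
        exact fun h => hne h.symm
      rw [hruns]
      constructor
      · intro hn
        rcases List.mem_cons.mp hn with h | h
        · exact ⟨c, .head rest, by rw [hcountc]; omega⟩
        · obtain ⟨c', hc', hcnt⟩ := (ih d hdlen hdpair n).mp h
          refine ⟨c', List.mem_cons_of_mem c (htd ▸ List.mem_append_right t hc'), ?_⟩
          rw [hcountd c' hc', hcnt]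
      · rintro ⟨c', hc', hcnt⟩
        by_cases hcc : c' = c
        · subst hcc
          rw [hcountc] at hcnt
          exact List.mem_cons.mpr (Or.inl hcnt.symm)
        · have hcr : c' ∈ rest := by
            rcases List.mem_cons.mp hc' with h | h
            · exact absurd h hcc
            · exact h
          have hcd : c' ∈ d := by
            rcases (htd ▸ hcr : c' ∈ t ++ d) |> List.mem_append.mp with h | h
            · exact absurd (htc c' h) hcc
            · exact h
          refine List.mem_cons.mpr (Or.inr ?_)
          exact (ih d hdlen hdpair n).mpr ⟨c', hcd, by rw [← hcountd c' hcd, hcnt]⟩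

-- per line: the membership tests of A and B agree
lemma line_eq (l : List Char) (ki : Int) (k : Nat) (hk : ki = (k : Int)) :
    (PySem.Dict.counter l).values.contains ki
      = (pvRuns (PySem.List.sorted l (fun x => x))).contains k := by
  rw [Bool.eq_iff_iff, List.contains_iff_mem, List.contains_iff_mem, hk, mem_values_counter,
    runs_mem (PySem.List.sorted l (fun x => x)).length _ le_rfl (PySem.List.sorted_pairwise l _) k]
  constructor
  · rintro ⟨c, hc, h⟩
    refine ⟨c, (PySem.List.mem_sorted l _ false c).mpr hc, ?_⟩
    rw [(PySem.List.sorted_perm l (fun x => x) false).count_eq]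
    exact_mod_cast h
  · rintro ⟨c, hc, h⟩
    refine ⟨c, (PySem.List.mem_sorted l _ false c).mp hc, ?_⟩
    rw [← (PySem.List.sorted_perm l (fun x => x) false).count_eq, h]

lemma step_eq : stepA = stepB := by
  funext tt line
  simp only [stepA, stepB, line_eq line 2 2 rfl, line_eq line 3 3 rfl]

-- ===== VERDICT (by name: the statement is the Claim_ definition above) =====
theorem solve_spec : Claim_equal_solve := by
  intro data _
  unfold Spec_solve solve solve_alt
  rw [step_eq]
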